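-- pv_equiv track=rewrite | github.com/RidwanMursal/ciphers | ciphers.py | valid_key
-- ===== SOURCE A (Python) =====
-- def valid_key(key):
--     """
--     ----------------------------------------------------
--     Static Method
--     Parameters:   key (?): an arbitrary input
--     Returns:      True/False
--     Description:  Check if given input is a valid Simple Substitution key
--                   The key is a tuple composing of two strings
--                   The base should contain at least two unique characters
--                   The keyword should have at least two unique characters defined in the base
--     ---------------------------------------------------
--     """
--     if not isinstance(key, tuple) or len(key) != 2 or not isinstance(key[0], str) or not isinstance(key[1], str) : return False
--     if len(key[1]) < 2 or (len(key[1]) == 2 and key[1][0] == key[1][1]) : return False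
--
--     a = []
--     for element in key[0].lower():
--         if element in key[1].lower() and element not in a:
--             a.append(element)
--         if len(a) >= 2 : return True
--
--     return False
-- ===== SOURCE B (Python) =====
-- def valid_key(key):
--     if not isinstance(key, tuple) or len(key) != 2 or not isinstance(key[0], str) or not isinstance(key[1], str):
--         return False
--     if len(key[1]) < 2 or (len(key[1]) == 2 and key[1][0] == key[1][1]):
--         return False
--     common = set(key[0].lower()) & set(key[1].lower())
--     return len(common) >= 2
-- ===== Notes on version B (the rewrite author's own statement) =====
-- stated objective: faster
-- what changed: The early-exit scan of key[0] with repeated substring membership tests and a hand-maintained distinct-element list is replaced by building the two lowercased character sets once and testing whether their intersection has at least two elements.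
import Mathlib
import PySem

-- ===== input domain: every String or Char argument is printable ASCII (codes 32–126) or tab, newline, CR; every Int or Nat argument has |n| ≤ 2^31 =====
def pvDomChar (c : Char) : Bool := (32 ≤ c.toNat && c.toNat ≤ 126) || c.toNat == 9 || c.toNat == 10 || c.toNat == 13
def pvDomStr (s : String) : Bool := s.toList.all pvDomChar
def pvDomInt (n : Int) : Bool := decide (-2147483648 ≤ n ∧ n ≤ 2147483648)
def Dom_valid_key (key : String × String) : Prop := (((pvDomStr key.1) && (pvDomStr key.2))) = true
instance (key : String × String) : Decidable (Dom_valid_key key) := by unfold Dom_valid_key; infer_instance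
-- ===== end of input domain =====

-- B replaces A's early-exit scan of key[0] (with a hand-maintained distinct list) by one
-- set intersection of the two lowercased character sets; same guards, same results (idiomatic).
-- The isinstance/tuple guards of the Python are statically true under the (String × String) type.

-- ===== PORT A =====
-- A's for-loop over key[0].lower() with accumulator `a` and early return;
-- `element in key[1].lower()` is single-char substring membership = char membership (exact).
def validKeyLoopA (k1 : List Char) : List Char → List Char → Bool
  | [], _ => false
  | e :: rest, a =>
    let a' := if k1.contains e && !(a.contains e) then a ++ [e] else a
    if 2 ≤ a'.length then true else validKeyLoopA k1 rest a'

def valid_key (key : String × String) : Bool :=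
  if (PySem.Str.len key.2 < 2) || (PySem.Str.len key.2 == 2 &&
      (PySem.Str.pyGet? key.2 0 == PySem.Str.pyGet? key.2 1)) then false
  else validKeyLoopA (PySem.Str.lower key.2).toList (PySem.Str.lower key.1).toList []

-- ===== PORT B =====
def valid_key_alt (key : String × String) : Bool :=
  if (PySem.Str.len key.2 < 2) || (PySem.Str.len key.2 == 2 &&
      (PySem.Str.pyGet? key.2 0 == PySem.Str.pyGet? key.2 1)) then false
  else
    let common := PySem.Set.inter (PySem.Set.ofList (PySem.Str.lower key.1).toList)
                                  (PySem.Set.ofList (PySem.Str.lower key.2).toList)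
    decide (2 ≤ common.length)

-- ===== PRECONDITION & SPEC =====
def Spec_valid_key (key : String × String) (out : Bool) : Prop := out = valid_key_alt key
instance (key : String × String) (out : Bool) : Decidable (Spec_valid_key key out) := by unfold Spec_valid_key; infer_instance

-- ===== CLAIM (what is proved, stated in full; the proofs are below) =====
def Claim_equal_valid_key : Prop := ∀ (key : String × String), Dom_valid_key key → Spec_valid_key key (valid_key key)

-- ===== LEMMAS AND PROOFS =====

theorem length_le_update (l s : List Char) : s.length ≤ (PySem.Set.update s l).length := by
  induction l generalizing s with
  | nil => simp [PySem.Set.update]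
  | cons x xs ih =>
    have h1 : s.length ≤ (PySem.Set.add s x).length := by
      simp only [PySem.Set.add]; split <;> simp
    calc s.length ≤ (PySem.Set.add s x).length := h1
      _ ≤ (PySem.Set.update (PySem.Set.add s x) xs).length := ih _
      _ = (PySem.Set.update s (x :: xs)).length := by simp [PySem.Set.update]

-- A's conditional append is exactly `Set.add` guarded by membership in k1
theorem stepA (k1 a : List Char) (e : Char) :
    (if k1.contains e && !(a.contains e) then a ++ [e] else a)
      = if k1.contains e then PySem.Set.add a e else a := by
  by_cases h : e ∈ a <;> by_cases h1 : e ∈ k1 <;> simp [PySem.Set.add, h, h1]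

theorem loopA_eq (k1 : List Char) : ∀ (k0 a : List Char), a.length < 2 →
    validKeyLoopA k1 k0 a
      = decide (2 ≤ (PySem.Set.update a (k0.filter (fun c => k1.contains c))).length) := by
  intro k0
  induction k0 with
  | nil => intro a ha; simp [validKeyLoopA, PySem.Set.update]; omega
  | cons e rest ih =>
    intro a ha
    simp only [validKeyLoopA]
    rw [stepA]
    by_cases hk : k1.contains e = true
    · rw [if_pos hk, List.filter_cons_of_pos hk]
      have hupd : PySem.Set.update a (e :: rest.filter (fun c => k1.contains c))
          = PySem.Set.update (PySem.Set.add a e) (rest.filter (fun c => k1.contains c)) := by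
        simp [PySem.Set.update]
      by_cases h2 : 2 ≤ (PySem.Set.add a e).length
      · rw [if_pos h2, hupd]
        exact (decide_eq_true (le_trans h2 (length_le_update _ _))).symm
      · rw [if_neg h2, ih _ (by omega), hupd]
    · rw [if_neg hk, List.filter_cons_of_neg (by simpa using hk),
        if_neg (show ¬ (2 ≤ a.length) by omega)]
      exact ih a ha

theorem main_eq (k0 k1 : List Char) :
    validKeyLoopA k1 k0 []
      = decide (2 ≤ (PySem.Set.inter (PySem.Set.ofList k0) (PySem.Set.ofList k1)).length) := by
  rw [loopA_eq k1 k0 [] (by simp)]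
  have hlen : (PySem.Set.update [] (k0.filter (fun c => k1.contains c))).length
      = (PySem.Set.inter (PySem.Set.ofList k0) (PySem.Set.ofList k1)).length := by
    apply List.Perm.length_eq
    rw [List.perm_ext_iff_of_nodup]
    · intro x
      simp [PySem.Set.mem_update, PySem.Set.mem_inter, PySem.Set.mem_ofList,
        List.mem_filter]
    · exact PySem.Set.nodup_update _ _ (by simp)
    · exact PySem.Set.nodup_inter _ _ (PySem.Set.nodup_ofList k0)
  rw [hlen]

-- ===== VERDICT (by name: the statement is the Claim_ definition above) =====
theorem valid_key_spec : Claim_equal_valid_key := by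
  intro key _
  unfold Spec_valid_key valid_key valid_key_alt
  split
  · rfl
  · exact main_eq _ _
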